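-- pv_equiv track=rewrite | github.com/00racle/coding | python/programmers/level1/mo_test.py | solution
-- ===== SOURCE A (Python) =====
-- def solution(answers):
--     s1 = [[1,2,3,4,5], [2,1,2,3,2,4,2,5], [3,3,1,1,2,2,4,4,5,5]]
--     s2 = []
--     ret = []
--     for i in s1:
--         s2.append(i*(len(answers)//len(i)) + i[:len(answers)%len(i)])
--
--     for i in s2:
--         cnt = 0
--         for j in range(len(answers)):
--             if answers[j] == i[j]:
--                 cnt += 1
--
--         ret.append(cnt)
--
--     m = max(ret)
--     return [ret.index(m)+1] if ret.count(m) == 1 else [i+1 for i in range(len(ret)) if ret[i] == m]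
-- ===== SOURCE B (Python) =====
-- def solution(answers):
--     p1 = [1, 2, 3, 4, 5]
--     p2 = [2, 1, 2, 3, 2, 4, 2, 5]
--     p3 = [3, 3, 1, 1, 2, 2, 4, 4, 5, 5]
--     c1 = c2 = c3 = 0
--     for j, a in enumerate(answers):
--         if p1[j % 5] == a:
--             c1 += 1
--         if p2[j % 8] == a:
--             c2 += 1
--         if p3[j % 10] == a:
--             c3 += 1
--     ret = [c1, c2, c3]
--     m = max(ret)
--     return [ret.index(m) + 1] if ret.count(m) == 1 else [i + 1 for i in range(len(ret)) if ret[i] == m]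
-- ===== Notes on version B (the rewrite author's own statement) =====
-- stated objective: simpler
-- what changed: Instead of materialising each pattern repeated to len(answers) and then scoring each full-length copy in a separate pass, B makes a single fused pass over answers with three counters, indexing each fixed pattern by j mod its length.
import Mathlib
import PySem

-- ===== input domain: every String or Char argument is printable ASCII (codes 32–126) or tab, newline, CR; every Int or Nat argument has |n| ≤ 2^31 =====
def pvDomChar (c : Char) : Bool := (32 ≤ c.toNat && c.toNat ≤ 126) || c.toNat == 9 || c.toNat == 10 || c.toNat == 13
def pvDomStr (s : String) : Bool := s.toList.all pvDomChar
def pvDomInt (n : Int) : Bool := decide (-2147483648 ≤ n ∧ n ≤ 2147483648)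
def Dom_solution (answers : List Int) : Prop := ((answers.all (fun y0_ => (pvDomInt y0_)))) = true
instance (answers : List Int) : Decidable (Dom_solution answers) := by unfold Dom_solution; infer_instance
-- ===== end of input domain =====

-- B replaces A's three materialised repeated answer lists by a single fused pass with three
-- counters and modulo pattern indexing (objective: simpler/alternative decomposition).
-- Both implementations share the identical final tie-break, ported once as pickBest.
def pickBest (ret : List Int) : List Int :=
  let m := (PySem.List.max? ret (fun x => x)).getD 0
  if ret.count m == 1 then [(((PySem.List.index? ret m).getD 0 : Nat) : Int) + 1]
  else (PySem.List.pyRange 0 ret.length 1).filterMap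
         (fun i => if PySem.List.pyGetD ret i 0 == m then some (i + 1) else none)

-- ===== PORT A =====
def solution (answers : List Int) : List Int :=
  let s1 : List (List Int) := [[1,2,3,4,5],[2,1,2,3,2,4,2,5],[3,3,1,1,2,2,4,4,5,5]]
  let s2 := s1.map (fun i =>
    (List.replicate (answers.length / i.length) i).flatten ++ i.take (answers.length % i.length))
  let ret := s2.map (fun i =>
    (PySem.List.pyRange 0 answers.length 1).foldl
      (fun cnt j => if PySem.List.pyGetD answers j 0 == PySem.List.pyGetD i j 0 then cnt + 1 else cnt)
      (0 : Int))
  pickBest ret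

-- ===== PORT B =====
def solution_alt (answers : List Int) : List Int :=
  let p1 : List Int := [1,2,3,4,5]
  let p2 : List Int := [2,1,2,3,2,4,2,5]
  let p3 : List Int := [3,3,1,1,2,2,4,4,5,5]
  let cs := (PySem.List.enumerate answers).foldl
    (fun (c : Int × Int × Int) ja =>
      ((if PySem.List.pyGetD p1 (PySem.Int.mod ja.1 5) 0 == ja.2 then c.1 + 1 else c.1),
       (if PySem.List.pyGetD p2 (PySem.Int.mod ja.1 8) 0 == ja.2 then c.2.1 + 1 else c.2.1),
       (if PySem.List.pyGetD p3 (PySem.Int.mod ja.1 10) 0 == ja.2 then c.2.2 + 1 else c.2.2)))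
    (0, 0, 0)
  pickBest [cs.1, cs.2.1, cs.2.2]

-- ===== PRECONDITION & SPEC =====
def Spec_solution (answers : List Int) (out : List Int) : Prop := out = solution_alt answers
instance (answers : List Int) (out : List Int) : Decidable (Spec_solution answers out) := by unfold Spec_solution; infer_instance

-- ===== CLAIM (what is proved, stated in full; the proofs are below) =====
def Claim_equal_solution : Prop := ∀ (answers : List Int), Dom_solution answers → Spec_solution answers (solution answers)

-- ===== LEMMAS AND PROOFS =====

-- canonical per-pattern count both sides are reduced to
def cnt (answers p : List Int) : Int :=
  (PySem.List.pyRange 0 answers.length 1).foldl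
    (fun c j => if PySem.List.pyGetD answers j 0 == PySem.List.pyGetD p (PySem.Int.mod j p.length) 0 then c + 1 else c)
    (0 : Int)

theorem len_flat_rep (p : List Int) (m : Nat) :
    ((List.replicate m p).flatten).length = m * p.length := by
  simp [List.length_flatten, List.map_replicate, List.sum_replicate, smul_eq_mul]

theorem getD_flat_rep (p : List Int) (m k : Nat) (hk : k < m * p.length) :
    ((List.replicate m p).flatten).getD k 0 = p.getD (k % p.length) 0 := by
  induction m generalizing k with
  | zero => simp at hk
  | succ m ih =>
    rw [Nat.succ_mul] at hk
    rw [List.replicate_succ, List.flatten_cons]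
    by_cases h : k < p.length
    · rw [List.getD_append _ _ _ _ h, Nat.mod_eq_of_lt h]
    · replace h := Nat.le_of_not_lt h
      rw [List.getD_append_right _ _ _ _ h, ih (k - p.length) (by omega),
          Nat.mod_eq_sub_mod h]

theorem getD_rep (p : List Int) (hp : 0 < p.length) (n k : Nat) (hk : k < n) :
    ((List.replicate (n / p.length) p).flatten ++ p.take (n % p.length)).getD k 0
      = p.getD (k % p.length) 0 := by
  set L := p.length with hLdef
  set m := n / L with hm
  have hlen : ((List.replicate m p).flatten).length = m * L := len_flat_rep p m
  have hn : m * L + n % L = n := by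
    rw [hm, Nat.mul_comm]; exact Nat.div_add_mod n L
  by_cases h : k < m * L
  · rw [List.getD_append _ _ _ _ (by omega), getD_flat_rep p m k h]
  · replace h := Nat.le_of_not_lt h
    have hr : n % L < L := Nat.mod_lt _ hp
    have hmod : k % L = k - m * L := by
      have hx : k = (k - m * L) + m * L := by omega
      rw [hx, Nat.add_mul_mod_self_right, Nat.mod_eq_of_lt (by omega)]
      omega
    have hlt : k - m * L < (p.take (n % L)).length := by
      simp only [List.length_take]
      omega
    rw [List.getD_append_right _ _ _ _ (by omega), hlen,
        List.getD_eq_getElem _ _ hlt, List.getElem_take, hmod,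
        List.getD_eq_getElem _ _ (by simp only [List.length_take] at hlt; omega)]

theorem a_count_eq_cnt (answers p : List Int) (hp : 0 < p.length) :
    (PySem.List.pyRange 0 answers.length 1).foldl
      (fun c j => if PySem.List.pyGetD answers j 0 ==
          PySem.List.pyGetD ((List.replicate (answers.length / p.length) p).flatten
            ++ p.take (answers.length % p.length)) j 0 then c + 1 else c)
      (0 : Int) = cnt answers p := by
  unfold cnt
  apply PySem.List.foldl_congr_mem
  intro acc j hj
  rw [PySem.List.mem_pyRange_one] at hj
  obtain ⟨h0, h1⟩ := hj
  obtain ⟨k, rfl⟩ := Int.eq_ofNat_of_zero_le h0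
  have hk : k < answers.length := by exact_mod_cast h1
  rw [PySem.Int.mod_natCast k p.length]
  simp only [PySem.List.pyGetD_natCast]
  rw [getD_rep p hp answers.length k hk]

theorem foldl_triple {α : Type} (l : List α) (f1 f2 f3 : Int → α → Int) (a b c : Int) :
    l.foldl (fun s x => (f1 s.1 x, f2 s.2.1 x, f3 s.2.2 x)) (a, b, c)
      = (l.foldl f1 a, l.foldl f2 b, l.foldl f3 c) := by
  induction l generalizing a b c with
  | nil => rfl
  | cons h t ih => simp [List.foldl_cons, ih]

theorem b_count_eq_cnt (answers p : List Int) (L : Int) (hL : L = (p.length : Int)) :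
    (PySem.List.pyRange 0 answers.length 1).foldl
      (fun c j => if PySem.List.pyGetD p (PySem.Int.mod j L) 0 ==
          PySem.List.pyGetD answers j 0 then c + 1 else c)
      (0 : Int) = cnt answers p := by
  subst hL
  unfold cnt
  apply PySem.List.foldl_congr_mem
  intro acc j _
  by_cases h : PySem.List.pyGetD p (PySem.Int.mod j (p.length : Int)) 0
      = PySem.List.pyGetD answers j 0
  · simp [h]
  · simp [h, Ne.symm h]

-- ===== VERDICT (by name: the statement is the Claim_ definition above) =====
theorem solution_spec : Claim_equal_solution := by
  intro answers _
  show solution answers = solution_alt answers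
  unfold solution solution_alt
  simp only [List.map_cons, List.map_nil]
  rw [PySem.List.enumerate_eq_map_pyRange (d := 0), List.foldl_map]
  simp only [PySem.List.len_eq]
  rw [foldl_triple (PySem.List.pyRange 0 (answers.length : Int) 1)
        (fun s j => if PySem.List.pyGetD [1,2,3,4,5] (PySem.Int.mod j 5) 0 == PySem.List.pyGetD answers j 0 then s + 1 else s)
        (fun s j => if PySem.List.pyGetD [2,1,2,3,2,4,2,5] (PySem.Int.mod j 8) 0 == PySem.List.pyGetD answers j 0 then s + 1 else s)
        (fun s j => if PySem.List.pyGetD [3,3,1,1,2,2,4,4,5,5] (PySem.Int.mod j 10) 0 == PySem.List.pyGetD answers j 0 then s + 1 else s)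
        0 0 0]
  rw [a_count_eq_cnt answers [1,2,3,4,5] (by decide),
      a_count_eq_cnt answers [2,1,2,3,2,4,2,5] (by decide),
      a_count_eq_cnt answers [3,3,1,1,2,2,4,4,5,5] (by decide),
      b_count_eq_cnt answers [1,2,3,4,5] 5 (by decide),
      b_count_eq_cnt answers [2,1,2,3,2,4,2,5] 8 (by decide),
      b_count_eq_cnt answers [3,3,1,1,2,2,4,4,5,5] 10 (by decide)]
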